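-- pv_equiv track=rewrite | github.com/kaloob/opteryx | opteryx/functions/other_functions.py | case_when
-- ===== SOURCE A (Python) =====
-- def case_when(conditions, values):
--     res = []
--     cons = list(zip(*conditions))
--     vals = zip(*values)
--     for idx, val_set in enumerate(vals):
--         offset = next((i for i, j in enumerate(cons[idx]) if j), None)
--         if offset is not None:
--             res.append(val_set[offset])
--         else:
--             res.append(None)
--     return res
-- ===== SOURCE B (Python) =====
-- def case_when(conditions, values):
--     nrows = min(map(len, values)) if values else 0
--     res = [None] * nrows
--     filled = [False] * nrows
--     for cond, col in zip(conditions, values):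
--         res = [col[r] if cond[r] and not filled[r] else res[r] for r in range(nrows)]
--         filled = [filled[r] or cond[r] for r in range(nrows)]
--     return res
-- ===== Notes on version B (the rewrite author's own statement) =====
-- stated objective: alternative
-- what changed: Replaces A's row-major transpose-then-first-match search with a column-major single pass that sweeps condition/value column pairs in order and fills each row at most once via a boolean mask.
import Mathlib
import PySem

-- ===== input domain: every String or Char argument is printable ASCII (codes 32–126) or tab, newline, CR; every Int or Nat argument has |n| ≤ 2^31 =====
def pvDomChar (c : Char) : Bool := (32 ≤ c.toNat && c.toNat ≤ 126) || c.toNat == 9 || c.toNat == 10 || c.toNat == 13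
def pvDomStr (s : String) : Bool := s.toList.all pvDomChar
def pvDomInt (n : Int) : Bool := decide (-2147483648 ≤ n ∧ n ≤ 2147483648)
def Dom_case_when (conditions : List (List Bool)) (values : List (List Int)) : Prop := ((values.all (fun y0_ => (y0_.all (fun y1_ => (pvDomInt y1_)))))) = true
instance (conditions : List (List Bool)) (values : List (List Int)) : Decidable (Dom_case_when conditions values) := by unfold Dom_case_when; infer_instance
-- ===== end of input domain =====

-- B replaces A's row-major transpose-and-first-match scan with a column-major sweep over
-- condition/value column pairs maintaining a fill-once boolean mask (alternative decomposition, same cost).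


-- ===== PORT A =====
-- zip(*xss) as the list of rows; row i reads each column with getD (in range wherever A returns)
def pyZipStar {α : Type} (d : α) (xss : List (List α)) : List (List α) :=
  let n := ((xss.map List.length).min?).getD 0
  (List.range n).map (fun i => xss.map (fun xs => xs.getD i d))

def case_when (conditions : List (List Bool)) (values : List (List Int)) : List (Option Int) :=
  let cons := pyZipStar false conditions
  let vals := pyZipStar 0 values
  (PySem.List.enumerate vals).foldl (fun res iv =>
    match (PySem.List.pyGetD cons iv.1 []).findIdx? (fun j => j) with
    | some offset => res ++ [some (iv.2.getD offset 0)]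
    | none => res ++ [none]) []

-- ===== PORT B =====
def case_when_alt (conditions : List (List Bool)) (values : List (List Int)) : List (Option Int) :=
  let nrows := ((values.map List.length).min?).getD 0
  ((conditions.zip values).foldl (fun st cc =>
      ((List.range nrows).map (fun r =>
          if cc.1.getD r false && !(st.2.getD r false) then some (cc.2.getD r 0) else st.1.getD r none),
       (List.range nrows).map (fun r => st.2.getD r false || cc.1.getD r false)))
    (List.replicate nrows none, List.replicate nrows false)).1

-- ===== PRECONDITION & SPEC =====
-- Pre_ excludes exactly the inputs where A raises IndexError: a row of zip(*values) beyond the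
-- rows of zip(*conditions), or a row whose first true condition index is not a valid value-column index.
def Pre_case_when (conditions : List (List Bool)) (values : List (List Int)) : Prop :=
  ((values.map List.length).min?).getD 0 ≤ ((conditions.map List.length).min?).getD 0 ∧
  ∀ r, r < ((values.map List.length).min?).getD 0 →
    ∀ o, (conditions.map (fun c => c.getD r false)).findIdx? (fun j => j) = some o →
      o < values.length
instance (conditions : List (List Bool)) (values : List (List Int)) : Decidable (Pre_case_when conditions values) := by unfold Pre_case_when; infer_instance

def pvWitness_case_when : List (List Bool) × List (List Int) :=
  ([[true, false], [false, true]], [[1, 2], [3, 4]])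

def Spec_case_when (conditions : List (List Bool)) (values : List (List Int)) (out : List (Option Int)) : Prop := out = case_when_alt conditions values
instance (conditions : List (List Bool)) (values : List (List Int)) (out : List (Option Int)) : Decidable (Spec_case_when conditions values out) := by unfold Spec_case_when; infer_instance

-- ===== CLAIM (what is proved, stated in full; the proofs are below) =====
def Claim_equal_case_when : Prop := ∀ (conditions : List (List Bool)) (values : List (List Int)), Dom_case_when conditions values → Pre_case_when conditions values → Spec_case_when conditions values (case_when conditions values)

-- ===== LEMMAS AND PROOFS =====
def pickRow (conditions : List (List Bool)) (values : List (List Int)) (r : Nat) : Option Int :=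
  match (conditions.map (fun c => c.getD r false)).findIdx? (fun j => j) with
  | some o => some ((values.getD o []).getD r 0)
  | none => none

def rowFold (cols : List (List Bool × List Int)) (r : Nat) (s : Option Int × Bool) : Option Int × Bool :=
  cols.foldl (fun s cc =>
    (if cc.1.getD r false && !s.2 then some (cc.2.getD r 0) else s.1, s.2 || cc.1.getD r false)) s

theorem rowFold_spec (r : Nat) (cols : List (List Bool × List Int)) : ∀ (s : Option Int × Bool),
    rowFold cols r s =
      ((if s.2 then s.1 else
          match (cols.map (fun cc => cc.1.getD r false)).findIdx? (fun j => j) with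
          | some o => some ((cols.getD o ([], [])).2.getD r 0)
          | none => s.1),
        s.2 || cols.any (fun cc => cc.1.getD r false)) := by
  induction cols with
  | nil => intro s; simp [rowFold]
  | cons cc t ih =>
    intro s
    have hstep : rowFold (cc :: t) r s =
        rowFold t r (if cc.1.getD r false && !s.2 then some (cc.2.getD r 0) else s.1,
          s.2 || cc.1.getD r false) := by
      simp [rowFold]
    rw [hstep, ih]
    simp only [List.findIdx?_cons, List.findIdx?_map]
    by_cases h2 : s.2 <;> by_cases hc : cc.1.getD r false <;>
      cases hfi : List.findIdx? ((fun j => j) ∘ fun cc => cc.1.getD r false) t <;>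
      (simp only [List.getD] at hc; simp [hc, h2, hfi, List.getD])

theorem maskLoop_eq (n : Nat) (cols : List (List Bool × List Int)) :
    ∀ (f : Nat → Option Int) (b : Nat → Bool),
    cols.foldl (fun st cc =>
        ((List.range n).map (fun r =>
            if cc.1.getD r false && !(st.2.getD r false) then some (cc.2.getD r 0) else st.1.getD r none),
         (List.range n).map (fun r => st.2.getD r false || cc.1.getD r false)))
      ((List.range n).map f, (List.range n).map b)
    = ((List.range n).map (fun r => (rowFold cols r (f r, b r)).1),
       (List.range n).map (fun r => (rowFold cols r (f r, b r)).2)) := by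
  induction cols with
  | nil => intro f b; simp [rowFold]
  | cons cc t ih =>
    intro f b
    rw [List.foldl_cons]
    have h1 : (List.range n).map (fun r =>
        if cc.1.getD r false && !(((List.range n).map b).getD r false) then some (cc.2.getD r 0)
        else ((List.range n).map f).getD r none) =
        (List.range n).map (fun r => if cc.1.getD r false && !(b r) then some (cc.2.getD r 0) else f r) := by
      apply List.map_congr_left
      intro r hr
      rw [List.mem_range] at hr
      rw [PySem.List.getD_map_range b n r false hr, PySem.List.getD_map_range f n r none hr]
    have h2 : (List.range n).map (fun r => ((List.range n).map b).getD r false || cc.1.getD r false) =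
        (List.range n).map (fun r => b r || cc.1.getD r false) := by
      apply List.map_congr_left
      intro r hr
      rw [List.mem_range] at hr
      rw [PySem.List.getD_map_range b n r false hr]
    rw [h1, h2, ih]
    have hrow : ∀ r, rowFold (cc :: t) r (f r, b r) =
        rowFold t r (if cc.1.getD r false && !(b r) then some (cc.2.getD r 0) else f r,
          b r || cc.1.getD r false) := by
      intro r; simp [rowFold]
    simp only [hrow]

theorem zip_map_fst_take {α β γ : Type} (q : α → γ) (c : List α) :
    ∀ (v : List β), (c.zip v).map (fun cc => q cc.1) = (c.take v.length).map q := by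
  induction c with
  | nil => intro v; simp
  | cons x t ih =>
    intro v
    cases v with
    | nil => simp
    | cons y w => simp [ih w]

theorem findIdx?_take_of_none {α : Type} (p : α → Bool) (l : List α) (k : Nat)
    (h : l.findIdx? p = none) : (l.take k).findIdx? p = none := by
  rw [List.findIdx?_eq_none_iff] at h ⊢
  intro x hx
  exact h x (List.mem_of_mem_take hx)

theorem findIdx?_take_of_some {α : Type} (p : α → Bool) (l : List α) (k o : Nat)
    (h : l.findIdx? p = some o) (hk : o < k) : (l.take k).findIdx? p = some o := by
  rw [List.findIdx?_eq_some_iff_getElem] at h ⊢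
  obtain ⟨hlen, hp, hmin⟩ := h
  refine ⟨by simp [List.length_take]; omega, ?_, ?_⟩
  · simpa [List.getElem_take] using hp
  · intro j hj
    have := hmin j hj
    simpa [List.getElem_take] using this
theorem case_when_eq_map_pick (c : List (List Bool)) (v : List (List Int))
    (h : Pre_case_when c v) :
    case_when c v =
      (List.range (((v.map List.length).min?).getD 0)).map (pickRow c v) := by
  obtain ⟨h1, _⟩ := h
  unfold case_when pyZipStar
  set n := ((v.map List.length).min?).getD 0 with hn
  set m := ((c.map List.length).min?).getD 0 with hm
  set cons := (List.range m).map (fun i => c.map (fun xs => xs.getD i false)) with hcons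
  set vals := (List.range n).map (fun i => v.map (fun xs => xs.getD i 0)) with hvals
  show (PySem.List.enumerate vals).foldl (fun res iv =>
      match (PySem.List.pyGetD cons iv.1 []).findIdx? (fun j => j) with
      | some offset => res ++ [some (iv.2.getD offset 0)]
      | none => res ++ [none]) [] = _
  have hF : (fun (res : List (Option Int)) (iv : Int × List Int) =>
      match (PySem.List.pyGetD cons iv.1 []).findIdx? (fun j => j) with
      | some offset => res ++ [some (iv.2.getD offset 0)]
      | none => res ++ [none])
      = fun res iv => res ++ [(fun iv : Int × List Int =>
          match (PySem.List.pyGetD cons iv.1 []).findIdx? (fun j => j) with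
          | some offset => some (iv.2.getD offset 0)
          | none => none) iv] := by
    funext res iv
    cases h' : (PySem.List.pyGetD cons iv.1 []).findIdx? (fun j => j) <;> simp [h']
  rw [hF, PySem.List.foldl_append_singleton_eq_map, List.nil_append]
  rw [PySem.List.enumerate_eq_map_pyRange vals ([] : List Int)]
  have hlen : PySem.List.len vals = (n : Int) := by
    simp [PySem.List.len, hvals]
  rw [hlen, PySem.List.pyRange_zero_natCast, List.map_map, List.map_map]
  apply List.map_congr_left
  intro k hk
  rw [List.mem_range] at hk
  simp only [Function.comp_apply]
  rw [PySem.List.pyGetD_natCast cons k ([] : List Bool),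
      PySem.List.pyGetD_natCast vals k ([] : List Int)]
  rw [hcons, hvals, PySem.List.getD_map_range _ m k _ (lt_of_lt_of_le hk h1),
      PySem.List.getD_map_range _ n k _ hk]
  unfold pickRow
  cases hfi : (c.map (fun col => col.getD k false)).findIdx? (fun j => j) with
  | none => simp [hfi]
  | some o =>
    simp only [hfi]
    have := List.getD_map v ([] : List (Int)) (n := o) (f := fun xs => xs.getD k 0)
    simp only [List.getD_nil] at this
    rw [this]

theorem case_when_alt_eq_map_pick (c : List (List Bool)) (v : List (List Int))
    (h : Pre_case_when c v) :
    case_when_alt c v =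
      (List.range (((v.map List.length).min?).getD 0)).map (pickRow c v) := by
  obtain ⟨_, h2⟩ := h
  unfold case_when_alt
  set n := ((v.map List.length).min?).getD 0 with hn
  show (((c.zip v).foldl (fun st cc =>
      ((List.range n).map (fun r =>
          if cc.1.getD r false && !(st.2.getD r false) then some (cc.2.getD r 0) else st.1.getD r none),
       (List.range n).map (fun r => st.2.getD r false || cc.1.getD r false)))
    (List.replicate n none, List.replicate n false)).1) = _
  have hrep1 : (List.replicate n (none : Option Int)) = (List.range n).map (fun _ => none) := by
    simp [List.map_const']
  have hrep2 : (List.replicate n false) = (List.range n).map (fun _ => false) := by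
    simp [List.map_const']
  rw [hrep1, hrep2, maskLoop_eq n (c.zip v) (fun _ => none) (fun _ => false)]
  dsimp only
  apply List.map_congr_left
  intro r hr
  rw [List.mem_range] at hr
  rw [rowFold_spec]
  dsimp only
  rw [if_neg (by simp)]
  have hzip : ((c.zip v).map (fun cc => cc.1.getD r false)) =
      (c.take v.length).map (fun col => col.getD r false) :=
    zip_map_fst_take (fun col => col.getD r false) c v
  unfold pickRow
  cases hfi : (c.map (fun col => col.getD r false)).findIdx? (fun j => j) with
  | none =>
    have htake : ((c.zip v).map (fun cc => cc.1.getD r false)).findIdx? (fun j => j) = none := by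
      rw [hzip, List.findIdx?_map]
      rw [List.findIdx?_map] at hfi
      exact findIdx?_take_of_none _ c v.length hfi
    rw [List.findIdx?_map] at htake
    simp only [List.getD] at htake
    simp [htake]
  | some o =>
    have ho : o < v.length := h2 r hr o hfi
    have hoc : o < c.length := by
      have := hfi
      rw [List.findIdx?_eq_some_iff_getElem] at this
      obtain ⟨hl, -, -⟩ := this
      simpa using hl
    have htake : ((c.zip v).map (fun cc => cc.1.getD r false)).findIdx? (fun j => j) = some o := by
      rw [hzip, List.findIdx?_map]
      rw [List.findIdx?_map] at hfi
      exact findIdx?_take_of_some _ c v.length o hfi ho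
    have hoz : o < (c.zip v).length := by simp [List.length_zip]; omega
    rw [htake]
    dsimp only
    rw [List.getD_eq_getElem _ _ hoz, List.getElem_zip, List.getD_eq_getElem _ _ ho]

-- ===== VERDICT (by name: the statement is the Claim_ definition above) =====
theorem case_when_spec : Claim_equal_case_when := by
  intro conditions values _ hpre
  unfold Spec_case_when
  rw [case_when_eq_map_pick conditions values hpre,
      case_when_alt_eq_map_pick conditions values hpre]
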